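-- pv_equiv track=rewrite | github.com/JLNSLR/UDP_TCP_dataVis_Studio | udp_tcp_timestamp.py | _split_prefix_num
-- ===== SOURCE A (Python) =====
-- def _split_prefix_num(s: str):
--     """
--     Return (prefix, number) for strings like 'ch12' or '12'.
--     Raises ValueError if no numeric suffix exists.
--     """
--     s = str(s).strip()
--     i = len(s)
--     while i > 0 and s[i - 1].isdigit():
--         i -= 1
--     prefix = s[:i]
--     if i == len(s):
--         raise ValueError(f"Missing numeric suffix in '{s}'")
--     return prefix, int(s[i:])
-- ===== SOURCE B (Python) =====
-- def _split_prefix_num(s: str):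
--     """
--     Return (prefix, number) for strings like 'ch12' or '12'.
--     Raises ValueError if no numeric suffix exists.
--     """
--     s = str(s).strip()
--     cut = 0
--     for j, ch in enumerate(s):
--         if not ch.isdigit():
--             cut = j + 1
--     if cut == len(s):
--         raise ValueError(f"Missing numeric suffix in '{s}'")
--     return s[:cut], int(s[cut:])
-- ===== Notes on version B (the rewrite author's own statement) =====
-- stated objective: alternative
-- what changed: Replaces A's backward index-decrement scan from the end of the string with a single forward left-to-right pass that maintains an accumulator (the position just after the last non-digit character seen), which directly yields the split point.
import Mathlib
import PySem

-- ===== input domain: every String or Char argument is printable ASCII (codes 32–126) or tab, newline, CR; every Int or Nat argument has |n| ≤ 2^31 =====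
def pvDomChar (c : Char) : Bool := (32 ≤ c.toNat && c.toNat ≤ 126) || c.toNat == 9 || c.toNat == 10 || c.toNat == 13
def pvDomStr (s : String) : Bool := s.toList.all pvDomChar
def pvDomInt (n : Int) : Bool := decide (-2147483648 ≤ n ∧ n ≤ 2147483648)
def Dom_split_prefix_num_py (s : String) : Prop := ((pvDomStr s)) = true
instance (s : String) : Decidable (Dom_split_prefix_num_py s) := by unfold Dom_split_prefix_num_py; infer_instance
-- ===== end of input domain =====

-- B replaces A's backward index-decrement scan with a single forward pass keeping the position after the last non-digit; same cost, proved equal on the ASCII domain.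


-- ===== PORT A =====
-- A's while loop 'while i > 0 and s[i-1].isdigit(): i -= 1', recursing on i; the read
-- s[i-1] at pattern i+1 is the in-range index i (0 ≤ i < len, so getD is exact).
def pvALoop (t : List Char) : Nat → Nat
  | 0 => 0
  | Nat.succ i => if PySem.Chars.isdigit (t.getD i ' ') then pvALoop t i else i + 1

def split_prefix_num_py (s : String) : String × Int :=
  let t := (PySem.Str.strip s).toList
  let i := pvALoop t t.length
  -- if i == len(s) Python raises ValueError: excluded by Pre_; int(s[i:]) cannot fail
  -- under Pre_, so the Option is discharged with getD 0 (never taken inside Pre_).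
  (String.ofList (PySem.List.slice t none (some (i : Int))),
   (PySem.Int.ofChars? (PySem.List.slice t (some (i : Int)) none)).getD 0)

-- ===== PORT B =====
-- Source B's forward pass: 'for j, ch in enumerate(s): if not ch.isdigit(): cut = j + 1'.
def pvBStep (cut : Int) (p : Int × Char) : Int :=
  if !PySem.Chars.isdigit p.2 then p.1 + 1 else cut

def split_prefix_num_py_alt (s : String) : String × Int :=
  let t := (PySem.Str.strip s).toList
  let cut := (PySem.List.enumerate t).foldl pvBStep 0
  -- if cut == len(s) Python raises ValueError: excluded by Pre_; as in A,
  -- int(s[cut:]) cannot fail under Pre_, so getD 0 is never taken there.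
  (String.ofList (PySem.List.slice t none (some cut)),
   (PySem.Int.ofChars? (PySem.List.slice t (some cut) none)).getD 0)

-- ===== PRECONDITION & SPEC =====
-- Pre_: the stripped string ends in a digit — exactly where Python A (and B) returns
-- instead of raising ValueError("Missing numeric suffix …").
def Pre_split_prefix_num_py (s : String) : Prop :=
  (((PySem.Str.strip s).toList.getLast?).map PySem.Chars.isdigit).getD false = true
instance (s : String) : Decidable (Pre_split_prefix_num_py s) := by
  unfold Pre_split_prefix_num_py; infer_instance
def pvWitness_split_prefix_num_py : String := "ch12"

def Spec_split_prefix_num_py (s : String) (out : String × Int) : Prop :=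
  out = split_prefix_num_py_alt s
instance (s : String) (out : String × Int) : Decidable (Spec_split_prefix_num_py s out) := by
  unfold Spec_split_prefix_num_py; infer_instance

-- ===== CLAIM (what is proved, stated in full; the proofs are below) =====
def Claim_equal_split_prefix_num_py : Prop :=
  ∀ (s : String), Dom_split_prefix_num_py s → Pre_split_prefix_num_py s →
    Spec_split_prefix_num_py s (split_prefix_num_py s)

-- ===== LEMMAS AND PROOFS =====
-- Appending a character A's loop never reads does not change it.
theorem pvALoop_append (t : List Char) (c : Char) :
    ∀ i, i ≤ t.length → pvALoop (t ++ [c]) i = pvALoop t i := by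
  intro i
  induction i with
  | zero => intro _; rfl
  | succ i ih =>
      intro h
      simp only [pvALoop, List.getD_append _ _ _ _ (show i < t.length by omega), ih (by omega)]

-- A's loop lands exactly where the trailing digit run starts.
theorem pvALoop_spec (t : List Char) :
    pvALoop t t.length = t.length - (t.reverse.takeWhile PySem.Chars.isdigit).length := by
  induction t using List.reverseRecOn with
  | nil => rfl
  | append_singleton t c ih =>
      have htk : (t.reverse.takeWhile PySem.Chars.isdigit).length ≤ t.length := by
        have := (List.takeWhile_sublist (p := PySem.Chars.isdigit) (l := t.reverse)).length_le
        simpa using this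
      have hlen : (t ++ [c]).length = t.length + 1 := by simp
      have hget : (t ++ [c]).getD t.length ' ' = c := by
        simp [List.getD_eq_getElem?_getD]
      rw [hlen]
      simp only [pvALoop, hget, List.reverse_append, List.reverse_singleton,
        List.singleton_append, List.takeWhile_cons]
      by_cases hc : PySem.Chars.isdigit c
      · rw [if_pos hc, if_pos hc, pvALoop_append t c t.length (le_refl _), ih]
        simp only [List.length_cons]
        omega
      · rw [if_neg hc, if_neg hc]
        simp

-- B's forward fold lands at the same split point.
theorem pvBFold_spec (t : List Char) :
    (PySem.List.enumerate t).foldl pvBStep 0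
      = ((t.length - (t.reverse.takeWhile PySem.Chars.isdigit).length : Nat) : Int) := by
  induction t using List.reverseRecOn with
  | nil => rfl
  | append_singleton t c ih =>
      have htk : (t.reverse.takeWhile PySem.Chars.isdigit).length ≤ t.length := by
        have := (List.takeWhile_sublist (p := PySem.Chars.isdigit) (l := t.reverse)).length_le
        simpa using this
      rw [PySem.List.enumerate_append, List.foldl_append]
      cases hc : PySem.Chars.isdigit c with
      | false =>
          simp only [PySem.List.enumerate_cons, PySem.List.enumerate_nil, List.foldl_cons,
            List.foldl_nil, zero_add, List.reverse_append, List.reverse_singleton,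
            List.singleton_append, List.takeWhile_cons, hc, Bool.false_eq_true, if_false,
            pvBStep, Bool.not_false, if_true, List.length_append, List.length_cons,
            List.length_nil]
          push_cast
          omega
      | true =>
          simp only [PySem.List.enumerate_cons, PySem.List.enumerate_nil, List.foldl_cons,
            List.foldl_nil, zero_add, List.reverse_append, List.reverse_singleton,
            List.singleton_append, List.takeWhile_cons, hc, if_true, pvBStep,
            Bool.not_true, Bool.false_eq_true, if_false, ih, List.length_append,
            List.length_cons, List.length_nil]
          omega

-- ===== VERDICT (by name: the statement is the Claim_ definition above) =====
theorem split_prefix_num_py_spec : Claim_equal_split_prefix_num_py := by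
  intro s _ _
  unfold Spec_split_prefix_num_py split_prefix_num_py split_prefix_num_py_alt
  set t := (PySem.Str.strip s).toList with ht
  have h : (PySem.List.enumerate t).foldl pvBStep 0 = ((pvALoop t t.length : Nat) : Int) := by
    rw [pvBFold_spec, pvALoop_spec]
  simp only [h]
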